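-- pv_equiv track=rewrite | github.com/Ilippy/Python_Dive_Lesson3 | main.py | every_one_have_except_one_v2
-- ===== SOURCE A (Python) =====
-- from functools import reduce
--
-- def every_one_have_except_one_v2(tour: dict) -> dict:
--     all_itme = reduce(lambda a, b: set(a) | set(b), tour.values())
--     result = {}
--     for item in all_itme:
--         count, full_name = 0, ''
--         for name, items in tour.items():
--             if item not in items:
--                 count += 1
--                 full_name = name
--         if count == 1:
--             result[item] = full_name
--     return result
-- ===== SOURCE B (Python) =====
-- def every_one_have_except_one_v2(tour: dict) -> dict:
--     # One pass: item -> set of names that own it; an item is "lacked by exactly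
--     # one name" iff it is owned by exactly len(tour)-1 names.
--     owners = {}
--     for name, items in tour.items():
--         for item in items:
--             owners.setdefault(item, set()).add(name)
--     n = len(tour)
--     result = {}
--     for item, who in owners.items():
--         if len(who) == n - 1:
--             result[item] = next(name for name in tour if name not in who)
--     return result
-- ===== Notes on version B (the rewrite author's own statement) =====
-- stated objective: faster
-- what changed: Instead of rescanning every name's whole item list for every distinct item (membership test per name per item), B makes one pass over the dict building item -> set of owning names, then emits each item owned by exactly len(tour)-1 names with the one non-owner as value.
import Mathlib
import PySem

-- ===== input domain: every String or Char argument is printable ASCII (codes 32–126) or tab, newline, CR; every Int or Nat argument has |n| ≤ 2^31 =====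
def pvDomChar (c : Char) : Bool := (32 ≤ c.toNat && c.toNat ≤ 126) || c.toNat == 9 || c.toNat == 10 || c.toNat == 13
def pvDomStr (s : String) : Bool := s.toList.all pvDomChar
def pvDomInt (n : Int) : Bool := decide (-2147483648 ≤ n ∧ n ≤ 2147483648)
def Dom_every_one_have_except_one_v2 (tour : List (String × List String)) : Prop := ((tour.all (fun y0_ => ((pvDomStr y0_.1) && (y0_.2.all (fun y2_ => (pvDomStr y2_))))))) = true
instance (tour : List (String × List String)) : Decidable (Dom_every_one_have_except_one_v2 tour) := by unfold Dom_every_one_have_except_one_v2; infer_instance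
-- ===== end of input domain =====

-- B replaces A's rescan of every name's whole list for every distinct item by a single
-- pass building item -> set of owning names, then reads off the items owned by all names but one.

-- ===== PORT A =====
def every_one_have_except_one_v2 (tour : List (String × List String)) : List (String × String) :=
  let d := PySem.Dict.ofList tour
  match d.values with
  | [] => []  -- Python: reduce over an empty dict raises TypeError; excluded by Pre_
  | v :: vs =>
    -- reduce(lambda a, b: set(a) | set(b), tour.values())
    let allItme := vs.foldl (fun a b => PySem.Set.union (PySem.Set.ofList a) (PySem.Set.ofList b)) v
    let result := allItme.foldl (fun (res : PySem.Dict String String) item =>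
        let cf := d.items.foldl (fun (cf : Int × String) nb =>
            if !(nb.2.contains item) then (cf.1 + 1, nb.1) else cf) ((0 : Int), "")
        if cf.1 = 1 then res.insert item cf.2 else res) PySem.Dict.empty
    result.items

-- ===== PORT B =====
def every_one_have_except_one_v2_alt (tour : List (String × List String)) : List (String × String) :=
  let d := PySem.Dict.ofList tour
  let owners : PySem.Dict String (PySem.Set String) :=
    d.items.foldl (fun ow nb =>
        nb.2.foldl (fun ow item =>
            ow.modify item PySem.Set.empty (fun s => PySem.Set.add s nb.1)) ow)
      PySem.Dict.empty
  let n : Int := d.size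
  let result := owners.items.foldl (fun (res : PySem.Dict String String) p =>
      if PySem.Set.len p.2 = n - 1 then
        match d.items.find? (fun nb => !(PySem.Set.contains p.2 nb.1)) with
        | some nb => res.insert p.1 nb.1
        | none => res  -- unreachable: |who| = n-1 < n leaves a name outside who
      else res) PySem.Dict.empty
  result.items

-- ===== PRECONDITION & SPEC =====
-- Pre_ excludes only the empty dict, on which A's reduce raises TypeError.
def Pre_every_one_have_except_one_v2 (tour : List (String × List String)) : Prop := tour ≠ []
instance (tour : List (String × List String)) : Decidable (Pre_every_one_have_except_one_v2 tour) := by unfold Pre_every_one_have_except_one_v2; infer_instance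
def pvWitness_every_one_have_except_one_v2 : (List (String × List String)) := [("a", ["x"]), ("b", [])]

def Spec_every_one_have_except_one_v2 (tour : List (String × List String)) (out : List (String × String)) : Prop := out = every_one_have_except_one_v2_alt tour
instance (tour : List (String × List String)) (out : List (String × String)) : Decidable (Spec_every_one_have_except_one_v2 tour out) := by unfold Spec_every_one_have_except_one_v2; infer_instance

-- ===== CLAIM (what is proved, stated in full; the proofs are below) =====
def Claim_equal_every_one_have_except_one_v2 : Prop := ∀ (tour : List (String × List String)), Dom_every_one_have_except_one_v2 tour → Pre_every_one_have_except_one_v2 tour → Spec_every_one_have_except_one_v2 tour (every_one_have_except_one_v2 tour)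

-- ===== LEMMAS AND PROOFS =====

-- The two port bodies, re-expressed over the dict's items list (definitionally equal to the ports).
def pvBodyA (es : List (String × List String)) : List (String × String) :=
  match es.map (fun x => x.2) with
  | [] => []
  | v :: vs =>
    let allItme := vs.foldl (fun a b => PySem.Set.union (PySem.Set.ofList a) (PySem.Set.ofList b)) v
    let result := allItme.foldl (fun (res : PySem.Dict String String) item =>
        let cf := es.foldl (fun (cf : Int × String) nb =>
            if !(nb.2.contains item) then (cf.1 + 1, nb.1) else cf) ((0 : Int), "")
        if cf.1 = 1 then res.insert item cf.2 else res) PySem.Dict.empty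
    result.items

def pvBodyB (es : List (String × List String)) : List (String × String) :=
  let owners : PySem.Dict String (PySem.Set String) :=
    es.foldl (fun ow nb =>
        nb.2.foldl (fun ow item =>
            ow.modify item PySem.Set.empty (fun s => PySem.Set.add s nb.1)) ow)
      PySem.Dict.empty
  let n : Int := es.length
  let result := owners.items.foldl (fun (res : PySem.Dict String String) p =>
      if PySem.Set.len p.2 = n - 1 then
        match es.find? (fun nb => !(PySem.Set.contains p.2 nb.1)) with
        | some nb => res.insert p.1 nb.1
        | none => res
      else res) PySem.Dict.empty
  result.items

theorem pv_portA_eq (tour : List (String × List String)) :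
    every_one_have_except_one_v2 tour = pvBodyA (PySem.Dict.ofList tour).items := rfl

theorem pv_portB_eq (tour : List (String × List String)) :
    every_one_have_except_one_v2_alt tour = pvBodyB (PySem.Dict.ofList tour).items := rfl

theorem pv_add_idem (s : PySem.Set String) (x : String) :
    PySem.Set.add (PySem.Set.add s x) x = PySem.Set.add s x := by
  have hx : x ∈ PySem.Set.add s x := (PySem.Set.mem_add s x x).mpr (Or.inr rfl)
  have hc : (PySem.Set.add s x).contains x = true := (PySem.Set.contains_iff _ _).mpr hx
  show (if (PySem.Set.add s x).contains x = true then PySem.Set.add s x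
        else PySem.Set.add s x ++ [x]) = PySem.Set.add s x
  rw [if_pos hc]

theorem pv_update_ofList (s : PySem.Set String) (xs : List String) :
    PySem.Set.update s (PySem.Set.ofList xs) = PySem.Set.update s xs := by
  rw [PySem.Set.update_eq_append_filter, PySem.Set.update_eq_append_filter, PySem.Set.ofList_ofList]

theorem pv_unionFoldl (vs : List (List String)) : ∀ (a : List String), a.Nodup →
    vs.foldl (fun a b => PySem.Set.union (PySem.Set.ofList a) (PySem.Set.ofList b)) a
      = PySem.Set.update a vs.flatten := by
  induction vs with
  | nil => intro a _; simp [PySem.Set.update_nil]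
  | cons b vs ih =>
    intro a ha
    have h1 : PySem.Set.union (PySem.Set.ofList a) (PySem.Set.ofList b) = PySem.Set.update a b := by
      rw [PySem.Set.ofList_eq_self_of_nodup _ ha]
      exact pv_update_ofList a b
    rw [List.foldl_cons, h1, ih _ (PySem.Set.nodup_update a b ha), List.flatten_cons,
      PySem.Set.update_append]

theorem pv_countFoldl (item : String) (es : List (String × List String)) : ∀ (c : Int) (s : String),
    es.foldl (fun (cf : Int × String) nb =>
        if !(nb.2.contains item) then (cf.1 + 1, nb.1) else cf) (c, s)
      = (c + ((es.filter (fun nb => !(nb.2.contains item))).length : Int),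
         ((es.filter (fun nb => !(nb.2.contains item))).map (fun x => x.1)).getLastD s) := by
  induction es with
  | nil => intro c s; simp
  | cons nb es ih =>
    intro c s
    rw [List.foldl_cons]
    by_cases h : nb.2.contains item = true
    · rw [if_neg (by simpa using h), ih,
        show List.filter (fun nb => !(nb.2.contains item)) (nb :: es)
            = List.filter (fun nb => !(nb.2.contains item)) es from
          List.filter_cons_of_neg (by simpa using h)]
    · rw [if_pos (by simpa using h), ih,
        show List.filter (fun nb => !(nb.2.contains item)) (nb :: es)
            = nb :: List.filter (fun nb => !(nb.2.contains item)) es from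
          List.filter_cons_of_pos (by simpa using h)]
      simp only [List.length_cons, List.map_cons, List.getLastD_cons, Prod.mk.injEq]
      exact ⟨by push_cast; ring, trivial⟩

theorem pv_innerGetD (name item : String) (items : List String) :
    ∀ ow : PySem.Dict String (PySem.Set String),
    (items.foldl (fun ow it =>
        ow.modify it PySem.Set.empty (fun s => PySem.Set.add s name)) ow).getD item PySem.Set.empty
      = if items.contains item then PySem.Set.add (ow.getD item PySem.Set.empty) name
        else ow.getD item PySem.Set.empty := by
  induction items with
  | nil => intro ow; simp
  | cons it its ih =>
    intro ow
    rw [List.foldl_cons, ih, PySem.Dict.getD_modify]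
    by_cases h : item = it
    · subst h
      by_cases h2 : its.contains item = true <;>
        simp [pv_add_idem, h2]
    · have hne : (it == item) = false := by simp [Ne.symm h]
      by_cases h2 : its.contains item = true <;>
        simp [h2, h, hne]

theorem pv_ownersGetD (item : String) (es : List (String × List String)) :
    ∀ ow : PySem.Dict String (PySem.Set String),
    (es.foldl (fun ow nb =>
        nb.2.foldl (fun ow it =>
            ow.modify it PySem.Set.empty (fun s => PySem.Set.add s nb.1)) ow) ow).getD item PySem.Set.empty
      = PySem.Set.update (ow.getD item PySem.Set.empty)
          ((es.filter (fun nb => nb.2.contains item)).map (fun x => x.1)) := by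
  induction es with
  | nil => intro ow; simp [PySem.Set.update_nil]
  | cons nb es ih =>
    intro ow
    rw [List.foldl_cons, ih, pv_innerGetD]
    by_cases h : nb.2.contains item = true
    · rw [if_pos h,
        show List.filter (fun nb => nb.2.contains item) (nb :: es)
            = nb :: List.filter (fun nb => nb.2.contains item) es from
          List.filter_cons_of_pos h,
        List.map_cons, PySem.Set.update_cons]
    · rw [if_neg h,
        show List.filter (fun nb => nb.2.contains item) (nb :: es)
            = List.filter (fun nb => nb.2.contains item) es from
          List.filter_cons_of_neg h]

theorem pv_ownersKeys (es : List (String × List String)) :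
    ∀ ow : PySem.Dict String (PySem.Set String),
    (es.foldl (fun ow nb =>
        nb.2.foldl (fun ow it =>
            ow.modify it PySem.Set.empty (fun s => PySem.Set.add s nb.1)) ow) ow).keys
      = PySem.Set.update ow.keys ((es.map (fun x => x.2)).flatten) := by
  induction es with
  | nil => intro ow; simp [PySem.Set.update_nil]
  | cons nb es ih =>
    intro ow
    rw [List.foldl_cons, ih,
      PySem.Dict.keys_foldl_modify nb.2 PySem.Set.empty (fun _ _ s => PySem.Set.add s nb.1) ow,
      List.map_cons, List.flatten_cons, PySem.Set.update_append]

theorem pv_filterCompl {α : Type} (p : α → Bool) (es : List α) :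
    (es.filter p).length + (es.filter (fun x => !p x)).length = es.length := by
  induction es with
  | nil => simp
  | cons e es ih => by_cases h : p e = true <;> simp [h, ← ih] <;> omega

theorem pv_findFilter {α : Type} (q p : α → Bool) (es : List α)
    (h : ∀ x ∈ es, q x = !(p x)) :
    es.find? q = (es.filter (fun x => !(p x))).head? := by
  induction es with
  | nil => simp
  | cons e es ih =>
    have he := h e (by simp)
    have ih' := ih (fun x hx => h x (by simp [hx]))
    by_cases hp : p e = true
    · have hq : q e = false := by simp [he, hp]
      rw [List.find?_cons]
      simp [hq, hp, ih']
    · have hq : q e = true := by simp [he, hp]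
      rw [List.find?_cons]
      simp [hq, hp]

theorem pv_whoContains (item : String) (es : List (String × List String))
    (hnd : (es.map (fun x => x.1)).Nodup) (nb : String × List String) (hmem : nb ∈ es) :
    PySem.Set.contains ((es.filter (fun x => x.2.contains item)).map (fun x => x.1)) nb.1
      = nb.2.contains item := by
  by_cases h : nb.2.contains item = true
  · rw [h]
    refine (PySem.Set.contains_iff _ _).mpr ?_
    exact List.mem_map.mpr ⟨nb, List.mem_filter.mpr ⟨hmem, h⟩, rfl⟩
  · have h' : nb.2.contains item = false := by simpa using h
    rw [h']
    refine Bool.eq_false_iff.mpr ?_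
    intro hc
    have hc' := (PySem.Set.contains_iff _ _).mp hc
    obtain ⟨x, hxf, hx1⟩ := List.mem_map.mp hc'
    obtain ⟨hxes, hxp⟩ := List.mem_filter.mp hxf
    have hxnb : x = nb := List.inj_on_of_nodup_map hnd hxes hmem hx1
    subst hxnb
    rw [h'] at hxp
    exact Bool.false_ne_true hxp

theorem pv_foldl_const {α β : Type} (l : List α) (init : β) :
    l.foldl (fun acc _ => acc) init = init := by
  induction l with
  | nil => rfl
  | cons x l ih => simp [ih]

-- Named pieces of the two bodies (definitionally equal to what the ports compute).
def pvCount (es : List (String × List String)) (item : String) : Int × String :=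
  es.foldl (fun (cf : Int × String) nb =>
      if !(nb.2.contains item) then (cf.1 + 1, nb.1) else cf) ((0 : Int), "")

def pvStepA (es : List (String × List String)) (res : PySem.Dict String String)
    (item : String) : PySem.Dict String String :=
  if (pvCount es item).1 = 1 then res.insert item (pvCount es item).2 else res

def pvOwners (es : List (String × List String)) : PySem.Dict String (PySem.Set String) :=
  es.foldl (fun ow nb =>
      nb.2.foldl (fun ow item =>
          ow.modify item PySem.Set.empty (fun s => PySem.Set.add s nb.1)) ow)
    PySem.Dict.empty

def pvStepB (es : List (String × List String)) (n : Int) (res : PySem.Dict String String)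
    (p : String × PySem.Set String) : PySem.Dict String String :=
  if PySem.Set.len p.2 = n - 1 then
    match es.find? (fun nb => !(PySem.Set.contains p.2 nb.1)) with
    | some nb => res.insert p.1 nb.1
    | none => res
  else res

theorem pvBodyA_cons (e : String × List String) (es' : List (String × List String)) :
    pvBodyA (e :: es') =
      (((es'.map (fun x => x.2)).foldl
          (fun a b => PySem.Set.union (PySem.Set.ofList a) (PySem.Set.ofList b)) e.2).foldl
        (pvStepA (e :: es')) PySem.Dict.empty).items := rfl

theorem pvBodyB_def (es : List (String × List String)) :
    pvBodyB es =
      ((pvOwners es).items.foldl (pvStepB es (es.length : Int)) PySem.Dict.empty).items := rfl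

theorem pv_ownersKeys0 (es : List (String × List String)) :
    (pvOwners es).keys = PySem.Set.ofList ((es.map (fun x => x.2)).flatten) := by
  unfold pvOwners
  rw [pv_ownersKeys, PySem.Dict.keys_empty, PySem.Set.update_nil_left]

theorem pv_who (es : List (String × List String)) (k : String) :
    (pvOwners es).getD k PySem.Set.empty
      = PySem.Set.ofList ((es.filter (fun nb => nb.2.contains k)).map (fun x => x.1)) := by
  unfold pvOwners
  rw [pv_ownersGetD, PySem.Dict.getD_empty]
  have he : (PySem.Set.empty : PySem.Set String) = [] := rfl
  rw [he, PySem.Set.update_nil_left]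

theorem pv_step_eq (es : List (String × List String))
    (hnd : (es.map (fun x => x.1)).Nodup) (res : PySem.Dict String String) (k : String) :
    pvStepB es (es.length : Int) res (k, (pvOwners es).getD k PySem.Set.empty)
      = pvStepA es res k := by
  have hnodup_own : ((es.filter (fun nb => nb.2.contains k)).map (fun x => x.1)).Nodup :=
    hnd.sublist (List.Sublist.map _ List.filter_sublist)
  have hwho : (pvOwners es).getD k PySem.Set.empty
      = (es.filter (fun nb => nb.2.contains k)).map (fun x => x.1) := by
    rw [pv_who, PySem.Set.ofList_eq_self_of_nodup _ hnodup_own]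
  have hc1 : (pvCount es k).1 = ((es.filter (fun nb => !(nb.2.contains k))).length : Int) := by
    unfold pvCount; rw [pv_countFoldl]; simp
  have hc2 : (pvCount es k).2
      = ((es.filter (fun nb => !(nb.2.contains k))).map (fun x => x.1)).getLastD "" := by
    unfold pvCount; rw [pv_countFoldl]
  have hlen := pv_filterCompl (fun nb => nb.2.contains k) es
  unfold pvStepA pvStepB
  rw [hwho, hc1, hc2]
  simp only [PySem.Set.len, List.length_map]
  by_cases h1 : (es.filter (fun nb => !(nb.2.contains k))).length = 1
  · have hA1 : (((es.filter (fun nb => !(nb.2.contains k))).length : Int)) = 1 := by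
      exact_mod_cast h1
    have hB1 : (((es.filter (fun nb => nb.2.contains k)).length : Int)) = (es.length : Int) - 1 := by
      omega
    rw [if_pos hA1, if_pos hB1]
    rw [pv_findFilter _ (fun nb => nb.2.contains k) es
      (fun x hx => by rw [pv_whoContains k es hnd x hx])]
    obtain ⟨nb0, hnb0⟩ := List.length_eq_one_iff.mp h1
    rw [hnb0]
    simp
  · have hA1 : ¬((((es.filter (fun nb => !(nb.2.contains k))).length : Int)) = 1) := by
      exact_mod_cast h1
    have hB1 : ¬((((es.filter (fun nb => nb.2.contains k)).length : Int)) = (es.length : Int) - 1) := by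
      omega
    rw [if_neg hA1, if_neg hB1]

theorem pv_body_eq (es : List (String × List String))
    (hnd : (es.map (fun x => x.1)).Nodup) : pvBodyA es = pvBodyB es := by
  obtain _ | ⟨e1, es'⟩ := es
  · rfl
  obtain _ | ⟨e2, rest⟩ := es'
  · -- a single name: both sides are the empty dict
    have hstep : ∀ (res : PySem.Dict String String), ∀ item ∈ e1.2, pvStepA [e1] res item = res := by
      intro res item hi
      have hfil : List.filter (fun nb => !(nb.2.contains item)) [e1] = [] := by
        simp [hi]
      have hc1 : (pvCount [e1] item).1 = 0 := by
        unfold pvCount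
        rw [pv_countFoldl, hfil]
        simp
      unfold pvStepA
      rw [hc1]
      simp
    rw [pvBodyA_cons]
    simp only [List.map_nil, List.foldl_nil]
    rw [PySem.List.foldl_congr_mem e1.2 (pvStepA [e1]) (fun res _ => res) PySem.Dict.empty
      (fun acc x hx => hstep acc x hx), pv_foldl_const]
    rw [pvBodyB_def]
    have hkeys : (pvOwners [e1]).keys = PySem.Set.ofList e1.2 := by
      rw [pv_ownersKeys0]; simp
    have hnodup : (pvOwners [e1]).keys.Nodup := by
      rw [hkeys]; exact PySem.Set.nodup_ofList _
    rw [PySem.Dict.items_eq_map_keys _ hnodup PySem.Set.empty]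
    simp only [List.foldl_map]
    rw [hkeys]
    rw [PySem.List.foldl_congr_mem (PySem.Set.ofList e1.2)
      (fun res k => pvStepB [e1] (([e1] : List (String × List String)).length : Int) res
        (k, (pvOwners [e1]).getD k PySem.Set.empty))
      (fun res _ => res) PySem.Dict.empty
      (fun acc k hk => by
        show pvStepB [e1] (([e1] : List (String × List String)).length : Int) acc
            (k, (pvOwners [e1]).getD k PySem.Set.empty) = acc
        rw [pv_step_eq [e1] hnd acc k]
        exact hstep acc k ((PySem.Set.mem_ofList _ _).mp hk)),
      pv_foldl_const]
  · -- at least two names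
    have hK : (((e2 :: rest).map (fun x => x.2)).foldl
        (fun a b => PySem.Set.union (PySem.Set.ofList a) (PySem.Set.ofList b)) e1.2)
        = PySem.Set.ofList (((e1 :: e2 :: rest).map (fun x => x.2)).flatten) := by
      rw [List.map_cons, List.foldl_cons]
      have h1 : PySem.Set.union (PySem.Set.ofList e1.2) (PySem.Set.ofList e2.2)
          = PySem.Set.ofList (e1.2 ++ e2.2) := by
        rw [show PySem.Set.union (PySem.Set.ofList e1.2) (PySem.Set.ofList e2.2)
            = PySem.Set.update (PySem.Set.ofList e1.2) (PySem.Set.ofList e2.2) from rfl,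
          pv_update_ofList, ← PySem.Set.ofList_append]
      rw [h1, pv_unionFoldl _ _ (PySem.Set.nodup_ofList _), ← PySem.Set.ofList_append]
      congr 1
      simp [List.append_assoc]
    rw [pvBodyA_cons, hK, pvBodyB_def]
    have hkeys : (pvOwners (e1 :: e2 :: rest)).keys
        = PySem.Set.ofList (((e1 :: e2 :: rest).map (fun x => x.2)).flatten) := pv_ownersKeys0 _
    have hnodup : (pvOwners (e1 :: e2 :: rest)).keys.Nodup := by
      rw [hkeys]; exact PySem.Set.nodup_ofList _
    rw [PySem.Dict.items_eq_map_keys _ hnodup PySem.Set.empty]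
    simp only [List.foldl_map]
    rw [hkeys]
    rw [PySem.List.foldl_congr_mem (PySem.Set.ofList (((e1 :: e2 :: rest).map (fun x => x.2)).flatten))
      (fun res k => pvStepB (e1 :: e2 :: rest) ((e1 :: e2 :: rest).length : Int) res
        (k, (pvOwners (e1 :: e2 :: rest)).getD k PySem.Set.empty))
      (pvStepA (e1 :: e2 :: rest)) PySem.Dict.empty
      (fun acc k _ => pv_step_eq (e1 :: e2 :: rest) hnd acc k)]

-- ===== VERDICT (by name: the statement is the Claim_ definition above) =====
theorem every_one_have_except_one_v2_spec : Claim_equal_every_one_have_except_one_v2 := by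
  intro tour _ _
  unfold Spec_every_one_have_except_one_v2
  rw [pv_portA_eq, pv_portB_eq]
  exact pv_body_eq _ (PySem.Dict.nodup_keys_ofList tour)
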